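-- pv_equiv track=rewrite | github.com/mohamedahmed-cloud/Problem-Solving | Random/0036.Flip Columns For Maximum Number of Equal Rows.py | solve
-- ===== SOURCE A (Python) =====
-- from collections import defaultdict,deque,Counter
--
-- def solve(matrix):
--     store=defaultdict(int)
--     for x in matrix:
--         add=[]
--         for i in x:
--             add.append(1-i)
--         store[str(add)]+=1
--         store[str(x)]+=1
--     return max(store.values())
-- ===== SOURCE B (Python) =====
-- def solve(matrix):
--     # sort-then-scan grouping: collect each row and its flipped form as tuples,
--     # sort so equal keys are adjacent, then walk chunks with two pointers.
--     keys = []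
--     for row in matrix:
--         keys.append(tuple(row))
--         keys.append(tuple(1 - v for v in row))
--     keys.sort()
--     best = 0
--     i = 0
--     n = len(keys)
--     while i < n:
--         j = i
--         while j < n and keys[j] == keys[i]:
--             j += 1
--         if j - i > best:
--             best = j - i
--         i = j
--     return best
-- ===== Notes on version B (the rewrite author's own statement) =====
-- stated objective: alternative
-- what changed: A groups each row and its flipped form via a defaultdict keyed by str(list) and takes the max dict value; B collects the same keys as tuples, sorts them so equal keys become adjacent, and finds the longest run with a two-pointer scan (sort-then-scan grouping instead of hash grouping).
import Mathlib
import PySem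

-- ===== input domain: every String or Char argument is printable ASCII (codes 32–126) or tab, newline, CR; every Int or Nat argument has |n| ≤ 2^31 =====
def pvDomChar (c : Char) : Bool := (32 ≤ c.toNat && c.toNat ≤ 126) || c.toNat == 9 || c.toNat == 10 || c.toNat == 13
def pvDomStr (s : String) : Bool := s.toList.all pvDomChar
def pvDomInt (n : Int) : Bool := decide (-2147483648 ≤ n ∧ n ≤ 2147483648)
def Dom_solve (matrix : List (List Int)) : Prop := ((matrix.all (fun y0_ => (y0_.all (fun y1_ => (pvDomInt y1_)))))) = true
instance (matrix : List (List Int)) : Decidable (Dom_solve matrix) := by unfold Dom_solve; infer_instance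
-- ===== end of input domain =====

-- B replaces A's dict of (row, flipped-row) string keys with sort-then-scan grouping of the
-- same keys (alternative decomposition, no hashing); return values agree on all non-empty
-- matrices; A's max() raises ValueError on an empty matrix, where B returns 0.

-- ===== PORT A =====
-- A keys its defaultdict by str(list); str is injective on lists of ints, so the port keys
-- the dict by the list itself: every count, and hence the result, is identical.
def solve (matrix : List (List Int)) : Int :=
  let store := matrix.foldl (fun d x =>
    let add := x.foldl (fun acc i => acc ++ [1 - i]) []
    let d := d.modify add 0 (· + 1)
    d.modify x 0 (· + 1)) (PySem.Dict.empty)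
  -- max(store.values()) raises ValueError on an empty dict: Pre_solve excludes matrix = []
  (PySem.List.max? store.values (fun v => v)).getD 0

-- ===== PORT B =====
-- the inner 'while j < n and keys[j] == keys[i]' walk of Source B: peel one chunk of equal keys
def bestRun : List (List Int) → Int
  | [] => 0
  | k :: t =>
    let run : Int := 1 + (t.takeWhile (fun y => y == k)).length
    max run (bestRun (t.dropWhile (fun y => y == k)))
  termination_by ys => ys.length
  decreasing_by
    simpa using Nat.lt_succ_of_le (List.length_dropWhile_le _ t)

def solve_alt (matrix : List (List Int)) : Int :=
  let keys := matrix.foldl (fun acc row => (acc ++ [row]) ++ [row.map (fun v => 1 - v)]) []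
  bestRun (PySem.List.sorted keys (fun k => k) false)

-- ===== PRECONDITION & SPEC =====
-- Pre_solve excludes exactly the empty matrix, on which A's max() over an empty dict raises ValueError.
def Pre_solve (matrix : List (List Int)) : Prop := matrix ≠ []
instance (matrix : List (List Int)) : Decidable (Pre_solve matrix) := by unfold Pre_solve; infer_instance
def pvWitness_solve : List (List Int) := [[0, 1], [1, 0], [0, 0]]

def Spec_solve (matrix : List (List Int)) (out : Int) : Prop := out = solve_alt matrix
instance (matrix : List (List Int)) (out : Int) : Decidable (Spec_solve matrix out) := by unfold Spec_solve; infer_instance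

-- ===== CLAIM (what is proved, stated in full; the proofs are below) =====
def Claim_equal_solve : Prop := ∀ (matrix : List (List Int)), Dom_solve matrix → Pre_solve matrix → Spec_solve matrix (solve matrix)

-- ===== LEMMAS AND PROOFS =====

-- the complement row
def compRow (x : List Int) : List Int := x.map (fun v => 1 - v)

-- A's key stream (insertion order: complement first, then the row itself)
def keysA (matrix : List (List Int)) : List (List Int) := matrix.flatMap (fun x => [compRow x, x])
-- B's key stream
def keysB (matrix : List (List Int)) : List (List Int) := matrix.flatMap (fun x => [x, compRow x])

theorem count_pair_comm (a b k : List Int) : List.count k [a, b] = List.count k [b, a] := by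
  by_cases h1 : a = k <;> by_cases h2 : b = k <;> simp [h1, h2]

theorem count_keysA_eq_keysB (matrix : List (List Int)) (k : List Int) :
    (keysA matrix).count k = (keysB matrix).count k := by
  induction matrix with
  | nil => rfl
  | cons x t ih =>
    simp only [keysA, keysB, List.flatMap_cons, List.count_append] at *
    rw [ih, count_pair_comm]

theorem mem_keysA_iff_keysB (matrix : List (List Int)) (k : List Int) :
    k ∈ keysA matrix ↔ k ∈ keysB matrix := by
  simp only [keysA, keysB, List.mem_flatMap, List.mem_cons,
    List.not_mem_nil, or_false]
  constructor <;> rintro ⟨a, ha, h⟩ <;> exact ⟨a, ha, Or.symm h⟩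

-- in a sorted list headed by k, the occurrences of k in the tail form exactly the
-- (· == k)-prefix, and everything after that prefix is strictly above k
theorem chunk_spec (k : List Int) (t : List (List Int))
    (hlb : ∀ y ∈ t, k ≤ y) (hp : t.Pairwise (fun a b => a ≤ b)) :
    (t.takeWhile (fun y => y == k)).length = t.count k ∧
    (∀ y ∈ t.dropWhile (fun y => y == k), k < y) := by
  induction t with
  | nil => simp
  | cons a t ih =>
    rcases hp with _ | ⟨ha, hp⟩
    by_cases hak : a = k
    · subst hak
      have h1 : ∀ y ∈ t, a ≤ y := fun y hy => ha y hy
      obtain ⟨hc, hd⟩ := ih h1 hp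
      constructor
      · simp [hc]
      · intro y hy
        rw [List.dropWhile_cons] at hy
        simpa using hd y (by simpa using hy)
    · have hka : k < a := lt_of_le_of_ne (hlb a (by simp)) (fun h => hak h.symm)
      have htw : (a :: t).takeWhile (fun y => y == k) = [] := by
        simp [hak]
      have hdw : (a :: t).dropWhile (fun y => y == k) = a :: t := by
        simp [hak]
      constructor
      · rw [htw]
        have : (a :: t).count k = 0 := by
          rw [List.count_eq_zero]
          intro hmem
          rcases List.mem_cons.mp hmem with h | h
          · exact hak h.symm
          · exact absurd (ha k h) (not_le_of_gt hka)
        simp [this]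
      · intro y hy
        rw [hdw] at hy
        rcases List.mem_cons.mp hy with h | h
        · exact h ▸ hka
        · exact lt_of_lt_of_le hka (ha y h)

theorem count_cons_eq_count_drop (h : List Int) (t : List (List Int)) (k : List Int)
    (hkh : k ≠ h) : (h :: t).count k = (t.dropWhile (fun y => y == h)).count k := by
  have hctw : (t.takeWhile (fun y => y == h)).count k = 0 := by
    rw [List.count_eq_zero]
    intro hmem
    exact hkh (by simpa using List.mem_takeWhile_imp hmem)
  conv_lhs => rw [List.count_cons,
    (List.takeWhile_append_dropWhile (p := fun y => y == h) (l := t)).symm]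
  rw [List.count_append, hctw]
  have : ¬ (h == k) = true := by simpa using fun he => hkh he.symm
  simp [this]

theorem bestRun_isMax (ys : List (List Int)) (hp : ys.Pairwise (fun a b => a ≤ b)) :
    ∀ k ∈ ys, (ys.count k : Int) ≤ bestRun ys := by
  induction ys using bestRun.induct with
  | case1 => simp
  | case2 h t ih =>
    intro k hk
    rcases hp with _ | ⟨hlb, hp⟩
    obtain ⟨hc, hd⟩ := chunk_spec h t hlb hp
    rw [bestRun]
    by_cases hkh : k = h
    · subst hkh
      refine le_trans ?_ (le_max_left _ _)
      rw [List.count_cons_self]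
      push_cast [hc]
      omega
    · have hcount := count_cons_eq_count_drop h t k hkh
      have hkd : k ∈ t.dropWhile (fun y => y == h) := by
        rw [← List.count_pos_iff, ← hcount, List.count_pos_iff]
        exact hk
      have hpd : (t.dropWhile (fun y => y == h)).Pairwise (fun a b => a ≤ b) :=
        hp.sublist (List.dropWhile_sublist _)
      have := ih hpd k hkd
      rw [hcount]
      exact le_trans this (le_max_right _ _)

theorem bestRun_attained (ys : List (List Int)) (hp : ys.Pairwise (fun a b => a ≤ b)) :
    bestRun ys = 0 ∨ ∃ k ∈ ys, bestRun ys = (ys.count k : Int) := by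
  induction ys using bestRun.induct with
  | case1 => left; simp [bestRun]
  | case2 h t ih =>
    rcases hp with _ | ⟨hlb, hp⟩
    obtain ⟨hc, hd⟩ := chunk_spec h t hlb hp
    have hpd : (t.dropWhile (fun y => y == h)).Pairwise (fun a b => a ≤ b) :=
      hp.sublist (List.dropWhile_sublist _)
    rw [bestRun]
    have hrun : (1 : Int) + (t.takeWhile (fun y => y == h)).length = ((h :: t).count h : Int) := by
      rw [List.count_cons_self]
      push_cast [hc]
      omega
    rcases le_total (bestRun (t.dropWhile (fun y => y == h)))
        ((1 : Int) + (t.takeWhile (fun y => y == h)).length) with hle | hle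
    · right
      refine ⟨h, by simp, ?_⟩
      rw [max_eq_left hle, hrun]
    · right
      rw [max_eq_right hle]
      rcases ih hpd with h0 | ⟨k, hk, hkeq⟩
      · exfalso
        have : (0 : Int) < 1 + (t.takeWhile (fun y => y == h)).length := by positivity
        omega
      · have hkh : k ≠ h := by
          intro he; subst he
          exact absurd (hd k hk) (lt_irrefl k)
        refine ⟨k, List.mem_cons_of_mem _ ((List.dropWhile_sublist _).mem hk), ?_⟩
        rw [hkeq, count_cons_eq_count_drop h t k hkh]

-- B's sorted key list is Pairwise (· ≤ ·)
theorem sortedKeys_pairwise (l : List (List Int)) :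
    (PySem.List.sorted l (fun k => k) false).Pairwise (fun a b => a ≤ b) := by
  have h := PySem.List.sorted_pairwise (κ := List Int) l (fun k => k)
  convert h using 2

-- A's store is the counter of keysA
theorem store_eq_counter (matrix : List (List Int)) :
    matrix.foldl (fun d x =>
      (d.modify (x.foldl (fun acc i => acc ++ [1 - i]) []) 0 (· + 1)).modify x 0 (· + 1))
      (PySem.Dict.empty) = PySem.Dict.counter (keysA matrix) := by
  rw [PySem.Dict.counter_eq_foldl]
  suffices hgen : ∀ (d : PySem.Dict (List Int) Int) (m : List (List Int)),
      m.foldl (fun d x =>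
        (d.modify (x.foldl (fun acc i => acc ++ [1 - i]) []) 0 (· + 1)).modify x 0 (· + 1)) d =
      (keysA m).foldl (fun d x => d.modify x 0 (· + 1)) d by
    exact hgen _ _
  intro d m
  induction m generalizing d with
  | nil => rfl
  | cons y s ihm =>
    simp only [List.foldl_cons, keysA, List.flatMap_cons, List.foldl_append]
    rw [← keysA]
    have hadd : y.foldl (fun acc i => acc ++ [1 - i]) [] = compRow y := by
      rw [PySem.List.foldl_append_singleton_eq_map]
      simp [compRow]
    rw [hadd]
    exact ihm _

theorem values_counter (l : List (List Int)) :
    (PySem.Dict.counter l).values = (PySem.Set.ofList l).map (fun k => (l.count k : Int)) := by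
  rw [PySem.Dict.values_eq_map_keys _ (PySem.Dict.nodup_keys_counter l) 0,
    PySem.Dict.keys_counter]
  exact List.map_congr_left (fun k _ => PySem.Dict.getD_counter l k)

theorem keysB_foldl (matrix : List (List Int)) :
    matrix.foldl (fun acc row => (acc ++ [row]) ++ [row.map (fun v => 1 - v)]) []
      = keysB matrix := by
  suffices h : ∀ (acc : List (List Int)),
      matrix.foldl (fun acc row => (acc ++ [row]) ++ [row.map (fun v => 1 - v)]) acc
      = acc ++ keysB matrix by
    simpa using h []
  induction matrix with
  | nil => intro acc; simp [keysB]
  | cons x t ih =>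
    intro acc
    simp only [List.foldl_cons]
    rw [ih]
    simp [keysB, compRow]

-- ===== VERDICT (by name: the statement is the Claim_ definition above) =====
theorem solve_spec : Claim_equal_solve := by
  intro matrix _hdom hpre
  unfold Spec_solve solve solve_alt
  dsimp only
  rw [store_eq_counter, values_counter, keysB_foldl]
  set S := PySem.List.sorted (keysB matrix) (fun k => k) false with hS
  have hperm : S.Perm (keysB matrix) := PySem.List.sorted_perm _ _ _
  have hpair : S.Pairwise (fun a b => a ≤ b) := sortedKeys_pairwise _
  obtain ⟨x, t, rfl⟩ := List.exists_cons_of_ne_nil hpre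
  have hmemA : compRow x ∈ keysA (x :: t) := by simp [keysA]
  have hsetne : PySem.Set.ofList (keysA (x :: t)) ≠ [] := by
    intro h
    have := (PySem.Set.mem_ofList (keysA (x :: t)) (compRow x)).mpr hmemA
    rw [h] at this
    exact absurd this (List.not_mem_nil)
  obtain ⟨k0, s0, hS0⟩ := List.exists_cons_of_ne_nil hsetne
  rw [hS0]
  simp only [List.map_cons, PySem.List.max?_id_cons, Option.getD_some]
  set A := (s0.map (fun k => ((keysA (x :: t)).count k : Int))).foldl max
    (((keysA (x :: t)).count k0 : Int)) with hA
  have hAmax : ∀ k ∈ PySem.Set.ofList (keysA (x :: t)), ((keysA (x :: t)).count k : Int) ≤ A := by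
    intro k hk
    rw [hS0] at hk
    rcases List.mem_cons.mp hk with h | h
    · subst h; exact (PySem.List.le_foldl_max _ _).1
    · exact (PySem.List.le_foldl_max _ _).2 _ (List.mem_map_of_mem h)
  have hAmem : A = (((keysA (x :: t)).count k0 : Int)) ∨
      A ∈ s0.map (fun k => ((keysA (x :: t)).count k : Int)) :=
    PySem.List.foldl_max_mem _ _
  have hcS : ∀ k, S.count k = (keysA (x :: t)).count k := by
    intro k
    rw [hperm.count_eq, ← count_keysA_eq_keysB]
  have hBA : bestRun S ≤ A := by
    rcases bestRun_attained S hpair with h0 | ⟨k, hk, hkeq⟩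
    · rw [h0]
      calc (0 : Int) ≤ (((keysA (x :: t)).count k0 : Int)) := by positivity
        _ ≤ A := hAmax k0 (by rw [hS0]; exact List.mem_cons_self)
    · rw [hkeq, hcS k]
      apply hAmax
      rw [PySem.Set.mem_ofList, mem_keysA_iff_keysB, ← hperm.mem_iff]
      exact hk
  have hAB : A ≤ bestRun S := by
    have hone : ∀ k ∈ PySem.Set.ofList (keysA (x :: t)),
        ((keysA (x :: t)).count k : Int) ≤ bestRun S := by
      intro k hk
      rw [← hcS k]
      apply bestRun_isMax S hpair
      rw [hperm.mem_iff, ← mem_keysA_iff_keysB]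
      exact (PySem.Set.mem_ofList _ _).mp hk
    rcases hAmem with h | h
    · rw [h]; exact hone k0 (by rw [hS0]; exact List.mem_cons_self)
    · obtain ⟨k, hk, hkeq⟩ := List.mem_map.mp h
      rw [← hkeq]
      exact hone k (by rw [hS0]; exact List.mem_cons_of_mem _ hk)
  omega
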